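-- pv_equiv track=rewrite | github.com/doporg/dop | defect-location-server/algorithm/src/defect_features/PRFL/prfl.py | finalArray
-- ===== SOURCE A (Python) =====
-- def finalArray(result,rank):
--     finalarray=[]
--     for ww in range(1,len(rank)+1):
--         for www in range(len(rank)):
--             if(rank[www]==ww):
--                 stri="可疑度第"+str(ww)+"的分数为："+str(result[www])+" 位置为："+str(www+1)
--                 finalarray.append(stri)
--     return  finalarray
-- ===== SOURCE B (Python) =====
-- def finalArray(result, rank):
--     n = len(rank)
--     buckets = {}
--     for i, r in enumerate(rank):
--         buckets.setdefault(r, []).append(i)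
--     out = []
--     for ww in range(1, n + 1):
--         for i in buckets.get(ww, []):
--             out.append("可疑度第"+str(ww)+"的分数为："+str(result[i])+" 位置为："+str(i+1))
--     return out
-- ===== Notes on version B (the rewrite author's own statement) =====
-- stated objective: faster
-- what changed: Replaced the quadratic rank-by-rank rescan (for each ww in 1..n, scan the whole rank list) by a single pass that buckets indices by rank value in a dict, then emits each bucket in rank order.
import Mathlib
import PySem

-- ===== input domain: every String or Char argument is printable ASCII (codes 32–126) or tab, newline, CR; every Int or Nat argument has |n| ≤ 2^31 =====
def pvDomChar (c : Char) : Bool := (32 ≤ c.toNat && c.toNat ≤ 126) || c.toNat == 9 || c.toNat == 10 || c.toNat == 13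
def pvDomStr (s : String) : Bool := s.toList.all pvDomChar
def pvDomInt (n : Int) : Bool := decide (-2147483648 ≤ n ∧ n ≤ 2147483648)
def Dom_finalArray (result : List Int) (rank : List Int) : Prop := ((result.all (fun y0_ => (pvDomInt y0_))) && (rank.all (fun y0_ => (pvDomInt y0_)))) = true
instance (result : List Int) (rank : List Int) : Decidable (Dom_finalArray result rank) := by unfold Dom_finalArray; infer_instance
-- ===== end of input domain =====

-- B replaces A's quadratic rank-by-rank rescan with a one-pass bucketing of indices by
-- rank value followed by an emission pass (objective: faster, asymptotically).

-- shared string formatter (the literal "可疑度第…"+str(…)… concatenation of both Pythons)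
def pvEntry (ww res pos : Int) : String :=
  "可疑度第" ++ PySem.Int.toStr ww ++ "的分数为：" ++ PySem.Int.toStr res
    ++ " 位置为：" ++ PySem.Int.toStr (pos + 1)

-- ===== PORT A =====
def finalArray (result : List Int) (rank : List Int) : List String :=
  (PySem.List.pyRange 1 ((rank.length : Int) + 1) 1).foldl (fun finalarray ww =>
    (PySem.List.pyRange 0 (rank.length : Int) 1).foldl (fun fa www =>
      if PySem.List.pyGetD rank www 0 == ww then
        fa ++ [pvEntry ww (PySem.List.pyGetD result www 0) www]
      else fa) finalarray) []

-- ===== PORT B =====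
def finalArray_alt (result : List Int) (rank : List Int) : List String :=
  let n : Int := rank.length
  let buckets : PySem.Dict Int (List Int) :=
    (PySem.List.enumerate rank 0).foldl
      (fun d p => d.modify p.2 [] (· ++ [p.1])) PySem.Dict.empty
  (PySem.List.pyRange 1 (n + 1) 1).foldl (fun out ww =>
    out ++ (buckets.getD ww []).map
      (fun i => pvEntry ww (PySem.List.pyGetD result i 0) i)) []

-- ===== PRECONDITION & SPEC =====
-- Pre_ excludes exactly the inputs on which A raises IndexError: some index i carries a
-- rank value in 1..len(rank) but result[i] does not exist.
def Pre_finalArray (result : List Int) (rank : List Int) : Prop :=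
  ∀ p ∈ PySem.List.enumerate rank 0,
    1 ≤ p.2 → p.2 ≤ (rank.length : Int) → p.1 < (result.length : Int)
instance (result : List Int) (rank : List Int) : Decidable (Pre_finalArray result rank) := by
  unfold Pre_finalArray; infer_instance
def pvWitness_finalArray : List Int × List Int := ([3, 4], [2, 1])

def Spec_finalArray (result : List Int) (rank : List Int) (out : List String) : Prop := out = finalArray_alt result rank
instance (result : List Int) (rank : List Int) (out : List String) : Decidable (Spec_finalArray result rank out) := by unfold Spec_finalArray; infer_instance

-- ===== CLAIM (what is proved, stated in full; the proofs are below) =====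
def Claim_equal_finalArray : Prop := ∀ (result : List Int) (rank : List Int), Dom_finalArray result rank → Pre_finalArray result rank → Spec_finalArray result rank (finalArray result rank)

-- ===== LEMMAS AND PROOFS =====

-- the bucket a rank value ww holds after the one-pass grouping fold: the indices i (in order)
-- whose rank is ww
theorem pv_bucket (rank : List Int) (ww : Int) :
    (((PySem.List.enumerate rank 0).foldl
        (fun d p => d.modify p.2 [] (· ++ [p.1])) PySem.Dict.empty).getD ww [])
      = (((PySem.List.enumerate rank 0).filter (fun p => p.2 == ww)).map (·.1)) := by
  have h := PySem.Dict.getD_foldl_modify_append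
      (l := (PySem.List.enumerate rank 0).map (fun p => (p.2, p.1)))
      (d := (PySem.Dict.empty : PySem.Dict Int (List Int))) (c := ww)
  rw [List.foldl_map] at h
  simp only [PySem.Dict.getD_empty, List.nil_append] at h
  rw [h, List.filter_map, List.map_map]
  rfl

-- A's inner scan over all indices equals appending B's bucket for ww, rendered
theorem pv_inner (result rank : List Int) (ww : Int) (acc : List String) :
    ((PySem.List.pyRange 0 (rank.length : Int) 1).foldl (fun fa www =>
        if PySem.List.pyGetD rank www 0 == ww then
          fa ++ [pvEntry ww (PySem.List.pyGetD result www 0) www]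
        else fa) acc)
      = acc ++ (((PySem.List.enumerate rank 0).filter (fun p => p.2 == ww)).map (·.1)).map
          (fun i => pvEntry ww (PySem.List.pyGetD result i 0) i) := by
  have he : PySem.List.enumerate rank 0
      = (PySem.List.pyRange 0 (rank.length : Int) 1).map
          (fun j => (j, PySem.List.pyGetD rank j 0)) := by
    simpa using PySem.List.enumerate_eq_map_pyRange (xs := rank) (d := 0)
  rw [PySem.List.foldl_append_if, he, List.filter_map, List.map_map, List.map_map]
  rfl

-- ===== VERDICT (by name: the statement is the Claim_ definition above) =====
theorem finalArray_spec : Claim_equal_finalArray := by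
  intro result rank _ _
  show finalArray result rank = finalArray_alt result rank
  simp only [finalArray, finalArray_alt]
  apply PySem.List.foldl_congr_mem
  intro acc ww _
  rw [pv_inner, pv_bucket]
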